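-- pv_equiv track=rewrite | github.com/MrBrantCode/unitest_baseline | mut_generate/mist_train_taco/taco_15777/solution.py | find_indices_to_remove
-- ===== SOURCE A (Python) =====
-- def find_indices_to_remove(s: str) -> (int, list):
--     R = []
--     i = 0
--     while i < len(s):
--         if i + 4 < len(s) and s[i:i + 5] == 'twone':
--             R.append(i + 2 + 1)  # Append the index of 'o' in 'twone'
--             i += 5
--         elif i + 2 < len(s) and (s[i:i + 3] == 'one' or s[i:i + 3] == 'two'):
--             R.append(i + 1 + 1)  # Append the index of the middle character in 'one' or 'two'
--             i += 3
--         else: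
--             i += 1
--     return len(R), R
-- ===== SOURCE B (Python) =====
-- def find_indices_to_remove(s: str) -> (int, list):
--     # One pass over all positions; no index jumping: a position contributes iff a
--     # pattern starts there and (for 'one') it is not the tail of a 'twone'.
--     R = []
--     for p in range(len(s)):
--         if s[p:p + 5] == 'twone':
--             R.append(p + 3)
--         elif s[p:p + 3] == 'two':
--             R.append(p + 2)
--         elif s[p:p + 3] == 'one' and not (p >= 2 and s[p - 2:p + 3] == 'twone'):
--             R.append(p + 2)
--     return len(R), R
-- ===== Notes on version B (the rewrite author's own statement) =====
-- stated objective: alternative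
-- what changed: Replaces A's while-loop automaton with variable index jumps (i += 5/3/1) by a single uniform pass over every position, deciding locally whether a pattern occurrence starts there ('one' occurrences that are the tail of a 'twone' are filtered by a look-behind test instead of being skipped by consuming the match).
import Mathlib
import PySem

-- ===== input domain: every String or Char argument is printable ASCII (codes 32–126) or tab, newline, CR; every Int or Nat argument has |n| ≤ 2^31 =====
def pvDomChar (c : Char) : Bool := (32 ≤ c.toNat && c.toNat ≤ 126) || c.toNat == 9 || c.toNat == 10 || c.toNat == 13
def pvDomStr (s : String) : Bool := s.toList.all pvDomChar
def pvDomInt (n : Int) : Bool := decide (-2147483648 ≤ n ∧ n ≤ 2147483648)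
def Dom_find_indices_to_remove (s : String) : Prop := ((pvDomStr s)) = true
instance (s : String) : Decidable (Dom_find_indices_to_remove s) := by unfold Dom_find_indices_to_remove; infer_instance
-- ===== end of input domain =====

-- B replaces A's index-jumping while-loop by one uniform per-position test (alternative decomposition, same cost).


-- ===== PORT A =====
-- s[i:i+k] == 'pat' with 0 ≤ i is exactly (toList.drop i).take k = pat.toList (slice clamps; equality of equal-length lists).
def pvLoopA (cs : List Char) (i : Nat) (R : List Int) : List Int :=
  if i < cs.length then
    if i + 4 < cs.length ∧ (cs.drop i).take 5 = ['t','w','o','n','e'] then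
      pvLoopA cs (i + 5) (R ++ [(i : Int) + 2 + 1])
    else if i + 2 < cs.length ∧ ((cs.drop i).take 3 = ['o','n','e'] ∨ (cs.drop i).take 3 = ['t','w','o']) then
      pvLoopA cs (i + 3) (R ++ [(i : Int) + 1 + 1])
    else
      pvLoopA cs (i + 1) R
  else R
termination_by cs.length - i

def find_indices_to_remove (s : String) : Int × List Int :=
  let R := pvLoopA s.toList 0 []
  ((R.length : Int), R)

-- ===== PORT B =====
-- the body of B's for-loop at position p: the value appended to R, if any
def pvHitB (cs : List Char) (p : Nat) : Option Int :=
  if (cs.drop p).take 5 = ['t','w','o','n','e'] then some ((p : Int) + 3)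
  else if (cs.drop p).take 3 = ['t','w','o'] then some ((p : Int) + 2)
  else if (cs.drop p).take 3 = ['o','n','e'] ∧
          ¬(2 ≤ p ∧ (cs.drop (p - 2)).take 5 = ['t','w','o','n','e']) then some ((p : Int) + 2)
  else none

def find_indices_to_remove_alt (s : String) : Int × List Int :=
  let R := (List.range s.toList.length).filterMap (pvHitB s.toList)
  ((R.length : Int), R)

-- ===== PRECONDITION & SPEC =====
def Spec_find_indices_to_remove (s : String) (out : Int × List Int) : Prop := out = find_indices_to_remove_alt s
instance (s : String) (out : Int × List Int) : Decidable (Spec_find_indices_to_remove s out) := by unfold Spec_find_indices_to_remove; infer_instance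

-- ===== CLAIM (what is proved, stated in full; the proofs are below) =====
def Claim_equal_find_indices_to_remove : Prop := ∀ (s : String), Dom_find_indices_to_remove s → Spec_find_indices_to_remove s (find_indices_to_remove s)

-- ===== LEMMAS AND PROOFS =====

-- from a successful pattern match, decompose the suffix
lemma pv_suffix_decomp {cs L : List Char} {p : Nat} (h : (cs.drop p).take L.length = L) :
    cs.drop p = L ++ cs.drop (p + L.length) := by
  conv_lhs => rw [← List.take_append_drop L.length (cs.drop p)]
  rw [h, List.drop_drop]

lemma pv_len_of_take {cs L : List Char} {p : Nat} (hL : L ≠ [])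
    (h : (cs.drop p).take L.length = L) : p + L.length ≤ cs.length := by
  have h1 : ((cs.drop p).take L.length).length = L.length := by rw [h]
  rw [List.length_take, List.length_drop] at h1
  have h2 : 0 < L.length := List.length_pos_iff.mpr hL
  omega

lemma pv_drop_add (cs : List Char) (i k : Nat) : cs.drop (i + k) = (cs.drop i).drop k := by
  rw [List.drop_drop, Nat.add_comm]

lemma pv_range3 (i : Nat) : List.range' i 3 = [i, i+1, i+2] := by
  simp [List.range']

lemma pv_range5 (i : Nat) : List.range' i 5 = [i, i+1, i+2, i+3, i+4] := by
  simp [List.range']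

-- The invariant: A never reaches a position whose one or two predecessors start a 'twone'.
lemma pv_key (cs : List Char) : ∀ k i R, cs.length - i = k →
    (∀ j, j + 1 = i ∨ j + 2 = i → ¬ (cs.drop j).take 5 = ['t','w','o','n','e']) →
    pvLoopA cs i R = R ++ (List.range' i (cs.length - i)).filterMap (pvHitB cs) := by
  intro k
  induction k using Nat.strong_induction_on with
  | _ k IH =>
    intro i R hk hinv
    rw [pvLoopA]
    by_cases hlt : i < cs.length
    · simp only [hlt, if_true]
      by_cases h5 : (cs.drop i).take 5 = ['t','w','o','n','e']
      · -- 'twone' matches at i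
        have hle : i + 5 ≤ cs.length := pv_len_of_take (L := ['t','w','o','n','e']) (by simp) h5
        have hd : cs.drop i = ['t','w','o','n','e'] ++ cs.drop (i + 5) :=
          pv_suffix_decomp (L := ['t','w','o','n','e']) h5
        have hg : i + 4 < cs.length := by omega
        simp only [hg, h5, and_true, if_true]
        have d1 : cs.drop (i + 1) = ['w','o','n','e'] ++ cs.drop (i + 5) := by
          rw [pv_drop_add cs i 1, hd]; rfl
        have d2 : cs.drop (i + 2) = ['o','n','e'] ++ cs.drop (i + 5) := by
          rw [pv_drop_add cs i 2, hd]; rfl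
        have d3 : cs.drop (i + 3) = ['n','e'] ++ cs.drop (i + 5) := by
          rw [pv_drop_add cs i 3, hd]; rfl
        have d4 : cs.drop (i + 4) = ['e'] ++ cs.drop (i + 5) := by
          rw [pv_drop_add cs i 4, hd]; rfl
        have e0 : pvHitB cs i = some ((i : Int) + 2 + 1) := by
          have h3 : ((i : Int) + 2 + 1) = (i : Int) + 3 := by ring
          rw [h3, pvHitB, if_pos h5]
        have e1 : pvHitB cs (i + 1) = none := by simp [pvHitB, d1]
        have e2 : pvHitB cs (i + 2) = none := by
          have hi2 : i + 2 - 2 = i := by omega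
          simp [pvHitB, d2, hi2, h5]
        have e3 : pvHitB cs (i + 3) = none := by simp [pvHitB, d3]
        have e4 : pvHitB cs (i + 4) = none := by simp [pvHitB, d4]
        have hsplit : List.range' i (cs.length - i)
            = List.range' i 5 ++ List.range' (i + 5) (cs.length - (i + 5)) := by
          rw [List.range'_append_1]; congr 1; omega
        rw [IH (cs.length - (i + 5)) (by omega) (i + 5) _ rfl ?_]
        · rw [hsplit, List.filterMap_append, pv_range5]
          simp [e0, e1, e2, e3, e4]
        · intro j hj
          rcases hj with hj | hj
          · have : j = i + 4 := by omega
            subst this; rw [d4]; simp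
          · have : j = i + 3 := by omega
            subst this; rw [d3]; simp
      · by_cases hor : (cs.drop i).take 3 = ['o','n','e'] ∨ (cs.drop i).take 3 = ['t','w','o']
        · -- 'one' or 'two' matches at i
          have hle : i + 3 ≤ cs.length := by
            rcases hor with h | h
            · exact pv_len_of_take (L := ['o','n','e']) (by simp) h
            · exact pv_len_of_take (L := ['t','w','o']) (by simp) h
          have hg : i + 2 < cs.length := by omega
          have hg5 : ¬(i + 4 < cs.length ∧ (cs.drop i).take 5 = ['t','w','o','n','e']) := by
            intro h; exact h5 h.2
          simp only [hg5, if_false, hg, hor, and_true, if_true]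
          have hsplit : List.range' i (cs.length - i)
              = List.range' i 3 ++ List.range' (i + 3) (cs.length - (i + 3)) := by
            rw [List.range'_append_1]; congr 1; omega
          rcases hor with hone | htwo
          · have hd : cs.drop i = ['o','n','e'] ++ cs.drop (i + 3) :=
              pv_suffix_decomp (L := ['o','n','e']) hone
            have d1 : cs.drop (i + 1) = ['n','e'] ++ cs.drop (i + 3) := by
              rw [pv_drop_add cs i 1, hd]; rfl
            have d2 : cs.drop (i + 2) = ['e'] ++ cs.drop (i + 3) := by
              rw [pv_drop_add cs i 2, hd]; rfl
            have hguard : ¬(2 ≤ i ∧ (cs.drop (i - 2)).take 5 = ['t','w','o','n','e']) := by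
              rintro ⟨h2, htw⟩
              exact hinv (i - 2) (Or.inr (by omega)) htw
            have e0 : pvHitB cs i = some ((i : Int) + 1 + 1) := by
              have h3 : ((i : Int) + 1 + 1) = (i : Int) + 2 := by ring
              rw [h3, pvHitB, if_neg h5, if_neg (by rw [hd]; simp), if_pos ⟨hone, hguard⟩]
            have e1 : pvHitB cs (i + 1) = none := by simp [pvHitB, d1]
            have e2 : pvHitB cs (i + 2) = none := by simp [pvHitB, d2]
            rw [IH (cs.length - (i + 3)) (by omega) (i + 3) _ rfl ?_]
            · rw [hsplit, List.filterMap_append, pv_range3]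
              simp [e0, e1, e2]
            · intro j hj
              rcases hj with hj | hj
              · have : j = i + 2 := by omega
                subst this; rw [d2]; simp
              · have : j = i + 1 := by omega
                subst this; rw [d1]; simp
          · have hd : cs.drop i = ['t','w','o'] ++ cs.drop (i + 3) :=
              pv_suffix_decomp (L := ['t','w','o']) htwo
            have d1 : cs.drop (i + 1) = ['w','o'] ++ cs.drop (i + 3) := by
              rw [pv_drop_add cs i 1, hd]; rfl
            have d2 : cs.drop (i + 2) = ['o'] ++ cs.drop (i + 3) := by
              rw [pv_drop_add cs i 2, hd]; rfl
            -- 'ne' after the 'two' would make the (failed) 'twone' test at i succeed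
            have hne : ¬ (cs.drop (i + 3)).take 2 = ['n','e'] := by
              intro h
              apply h5
              have hd2 : cs.drop (i + 3) = ['n','e'] ++ cs.drop (i + 3 + 2) :=
                pv_suffix_decomp (L := ['n','e']) h
              rw [hd, hd2]; rfl
            have e0 : pvHitB cs i = some ((i : Int) + 1 + 1) := by
              have h3 : ((i : Int) + 1 + 1) = (i : Int) + 2 := by ring
              rw [h3, pvHitB, if_neg h5, if_pos (by rw [hd]; rfl)]
            have e1 : pvHitB cs (i + 1) = none := by simp [pvHitB, d1]
            have e2 : pvHitB cs (i + 2) = none := by simp [pvHitB, d2, hne]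
            rw [IH (cs.length - (i + 3)) (by omega) (i + 3) _ rfl ?_]
            · rw [hsplit, List.filterMap_append, pv_range3]
              simp [e0, e1, e2]
            · intro j hj
              rcases hj with hj | hj
              · have : j = i + 2 := by omega
                subst this; rw [d2]; simp
              · have : j = i + 1 := by omega
                subst this; rw [d1]; simp
        · -- no pattern starts at i
          have hg5 : ¬(i + 4 < cs.length ∧ (cs.drop i).take 5 = ['t','w','o','n','e']) := by
            intro h; exact h5 h.2
          have hg3 : ¬(i + 2 < cs.length ∧ ((cs.drop i).take 3 = ['o','n','e'] ∨ (cs.drop i).take 3 = ['t','w','o'])) := by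
            intro h; exact hor h.2
          simp only [hg5, hg3, if_false]
          have hnone : pvHitB cs i = none := by
            have h1 : ¬ (cs.drop i).take 3 = ['o','n','e'] := fun h => hor (Or.inl h)
            have h2 : ¬ (cs.drop i).take 3 = ['t','w','o'] := fun h => hor (Or.inr h)
            simp [pvHitB, h5, h1, h2]
          have hsplit : List.range' i (cs.length - i)
              = i :: List.range' (i + 1) (cs.length - (i + 1)) := by
            rw [show cs.length - i = (cs.length - (i + 1)) + 1 by omega, List.range'_succ]
          rw [IH (cs.length - (i + 1)) (by omega) (i + 1) _ rfl ?_]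
          · rw [hsplit]
            simp [hnone]
          · intro j hj
            rcases hj with hj | hj
            · have : j = i := by omega
              subst this; exact h5
            · have : j + 1 = i := by omega
              exact hinv j (Or.inl this)
    · simp only [hlt, if_false]
      have : cs.length - i = 0 := by omega
      rw [this]; simp

-- ===== VERDICT (by name: the statement is the Claim_ definition above) =====
theorem find_indices_to_remove_spec : Claim_equal_find_indices_to_remove := by
  intro s _
  unfold Spec_find_indices_to_remove find_indices_to_remove find_indices_to_remove_alt
  have h := pv_key s.toList (s.toList.length - 0) 0 [] rfl (by intro j hj; omega)
  rw [List.range_eq_range']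
  simp only [Nat.sub_zero] at h
  rw [h]
  simp
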